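-- pv_equiv track=rewrite | github.com/edt-yxz-zzd/txt_phone | txt/script/primality_test.py | mk_uint2primes__p_divs__lt
-- ===== SOURCE A (Python) =====
-- def mk_uint2primes__p_divs__lt(N, /):
--     u2ps = [set() for i in range(N)]
--     for i in range(2, N):
--         if u2ps[i]: continue
--         # i is prime
--         p = i
--         for j in range(p, N, p):
--             u2ps[j].add(p)
--     return u2ps
-- ===== SOURCE B (Python) =====
-- def mk_uint2primes__p_divs__lt(N, /):
--     # smallest-prime-factor table: spf[m] = least prime dividing m (0 for m < 2)
--     spf = [0] * N
--     for d in range(2, N):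
--         if spf[d] == 0:
--             for j in range(d, N, d):
--                 if spf[j] == 0:
--                     spf[j] = d
--     def prime_divisors(n):
--         ps = set()
--         m = n
--         while m > 1:
--             p = spf[m]
--             ps.add(p)
--             while m % p == 0:
--                 m //= p
--         return ps
--     return [prime_divisors(n) for n in range(N)]
-- ===== Notes on version B (the rewrite author's own statement) =====
-- stated objective: alternative
-- what changed: A appends each prime to the divisor-set of every one of its multiples during the sieve; B instead records only each integer's smallest prime factor in an int table and then factorizes every n independently by repeatedly dividing out spf[m].
import Mathlib
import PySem

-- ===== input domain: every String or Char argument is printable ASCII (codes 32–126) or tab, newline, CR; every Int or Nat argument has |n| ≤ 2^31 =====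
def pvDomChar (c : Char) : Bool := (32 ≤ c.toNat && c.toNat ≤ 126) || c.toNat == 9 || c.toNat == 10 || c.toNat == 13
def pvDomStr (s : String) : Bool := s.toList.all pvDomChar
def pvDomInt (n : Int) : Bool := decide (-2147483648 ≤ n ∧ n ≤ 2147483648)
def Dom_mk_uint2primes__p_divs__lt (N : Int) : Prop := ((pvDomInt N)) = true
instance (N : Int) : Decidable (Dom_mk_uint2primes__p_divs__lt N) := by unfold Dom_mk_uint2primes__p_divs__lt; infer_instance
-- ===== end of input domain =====

-- B records only each integer's smallest prime factor in an int table and then factorizes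
-- every n < N independently by repeated division, instead of A's sieve that appends each
-- prime to the divisor-set of all its multiples (objective: alternative algorithm).

-- ===== PORT A =====
-- u2ps[j].add(p) : read entry j (j ≥ 0 here, so pyGet? = plain lookup), add p to the set,
-- write it back at index j.
def pvMark (u : List (List Int)) (j p : Int) : List (List Int) :=
  u.set j.toNat (PySem.Set.add ((PySem.List.pyGet? u j).getD []) p)

-- one iteration of the outer loop:
-- if u2ps[i]: continue   (truthiness of a set = nonemptiness; i ∈ [2,N) is in range)
-- else p = i; for j in range(p, N, p): u2ps[j].add(p)
def pvOuter (N : Int) (u2ps : List (List Int)) (i : Int) : List (List Int) :=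
  if ((PySem.List.pyGet? u2ps i).getD []) ≠ [] then u2ps
  else (PySem.List.pyRange i N i).foldl (fun u j => pvMark u j i) u2ps

def mk_uint2primes__p_divs__lt (N : Int) : List (List Int) :=
  -- u2ps = [set() for i in range(N)]
  let u2ps : List (List Int) := (PySem.List.pyRange 0 N 1).map (fun _ => PySem.Set.empty)
  -- for i in range(2, N): ...
  (PySem.List.pyRange 2 N 1).foldl (pvOuter N) u2ps

-- ===== PORT B =====
-- spf[j] = d  (only when spf[j] == 0): read entry j (j ≥ 2 here), write d back at index j
def pvSpfMark (s : List Int) (j d : Int) : List Int :=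
  if (PySem.List.pyGet? s j).getD 0 = 0 then s.set j.toNat d else s

-- one iteration of B's sieve loop: if spf[d] == 0: for j in range(d, N, d): ...
def pvSpfOuter (N : Int) (spf : List Int) (d : Int) : List Int :=
  if (PySem.List.pyGet? spf d).getD 0 = 0 then
    (PySem.List.pyRange d N d).foldl (fun s j => pvSpfMark s j d) spf
  else spf

-- while m % d == 0: m //= d   — the extra '2 ≤ d ∧ 1 ≤ m' in the guard only makes the
-- recursion total (Python's loop would not terminate there; never reached from B's calls).
def pvStrip (m d : Int) : Int :=
  if h : 2 ≤ d ∧ 1 ≤ m ∧ PySem.Int.mod m d = 0 then pvStrip (PySem.Int.floordiv m d) d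
  else m
termination_by m.toNat
decreasing_by
  have h1 : PySem.Int.floordiv m d = m / d := PySem.Int.floordiv_eq_ediv_of_pos (by omega)
  have h2 : m / d < m := by
    apply Int.ediv_lt_of_lt_mul (by omega)
    nlinarith [h.1, h.2.1]
  omega

-- bound needed by pvChain's termination: stripping factors never increases m
theorem pvStrip_le (m d : Int) : pvStrip m d ≤ m ∨ pvStrip m d = m := by
  induction m using pvStrip.induct (d := d) with
  | case1 m h ih =>
    rw [pvStrip, dif_pos h]
    have h1 : PySem.Int.floordiv m d = m / d := PySem.Int.floordiv_eq_ediv_of_pos (by omega)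
    have h2 : m / d < m := by
      apply Int.ediv_lt_of_lt_mul (by omega)
      nlinarith [h.1, h.2.1]
    omega
  | case2 m h => rw [pvStrip, dif_neg h]; right; rfl

-- while m > 1: p = spf[m]; ps.add(p); while m % p == 0: m //= p
-- the conjuncts '2 ≤ spf[m]' and 'm % spf[m] == 0' in the guard only make the recursion
-- total: with the spf table B builds they always hold when 1 < m (Python's inner while
-- would itself not terminate on a table violating them).
def pvChain (spf : List Int) (m : Int) (ps : List Int) : List Int :=
  if h : 1 < m ∧ 2 ≤ (PySem.List.pyGet? spf m).getD 0 ∧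
      PySem.Int.mod m ((PySem.List.pyGet? spf m).getD 0) = 0 then
    pvChain spf (pvStrip m ((PySem.List.pyGet? spf m).getD 0))
      (PySem.Set.add ps ((PySem.List.pyGet? spf m).getD 0))
  else ps
termination_by m.toNat
decreasing_by
  obtain ⟨h1, h2, h3⟩ := h
  have he : pvStrip m ((PySem.List.pyGet? spf m).getD 0)
      = pvStrip (PySem.Int.floordiv m ((PySem.List.pyGet? spf m).getD 0))
        ((PySem.List.pyGet? spf m).getD 0) := by
    rw [pvStrip, dif_pos ⟨h2, by omega, h3⟩]
  have hfd : PySem.Int.floordiv m ((PySem.List.pyGet? spf m).getD 0)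
      = m / ((PySem.List.pyGet? spf m).getD 0) :=
    PySem.Int.floordiv_eq_ediv_of_pos (by omega)
  have hlt : m / ((PySem.List.pyGet? spf m).getD 0) < m := by
    apply Int.ediv_lt_of_lt_mul (by omega)
    nlinarith
  have := pvStrip_le (PySem.Int.floordiv m ((PySem.List.pyGet? spf m).getD 0))
    ((PySem.List.pyGet? spf m).getD 0)
  omega

def mk_uint2primes__p_divs__lt_alt (N : Int) : List (List Int) :=
  -- spf = [0] * N; for d in range(2, N): ...
  let spf := (PySem.List.pyRange 2 N 1).foldl (pvSpfOuter N) (List.replicate N.toNat (0 : Int))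
  -- [prime_divisors(n) for n in range(N)]
  (PySem.List.pyRange 0 N 1).map (fun n => pvChain spf n PySem.Set.empty)

-- ===== PRECONDITION & SPEC =====
def Spec_mk_uint2primes__p_divs__lt (N : Int) (out : List (List Int)) : Prop := out = mk_uint2primes__p_divs__lt_alt N
instance (N : Int) (out : List (List Int)) : Decidable (Spec_mk_uint2primes__p_divs__lt N out) := by unfold Spec_mk_uint2primes__p_divs__lt; infer_instance

-- ===== CLAIM (what is proved, stated in full; the proofs are below) =====
def Claim_equal_mk_uint2primes__p_divs__lt : Prop := ∀ (N : Int), Dom_mk_uint2primes__p_divs__lt N → Spec_mk_uint2primes__p_divs__lt N (mk_uint2primes__p_divs__lt N)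

-- ===== LEMMAS AND PROOFS =====

-- the common specification: the increasing list of primes p < k with p | j (p ≤ j kills j = 0)
def pvPred (j : Nat) (p : Nat) : Bool := decide (Nat.Prime p ∧ p ∣ j ∧ p ≤ j)
def Pb (k j : Nat) : List Int := ((List.range k).filter (pvPred j)).map (fun p : Nat => (p : Int))

theorem Pb_two (j : Nat) : Pb 2 j = [] := by
  have h0 : pvPred j 0 = false := by simp [pvPred, Nat.not_prime_zero]
  have h1 : pvPred j 1 = false := by simp [pvPred, Nat.not_prime_one]
  simp [Pb, List.range_succ, h0, h1]

theorem Pb_succ (k j : Nat) : Pb (k + 1) j = Pb k j ++ (if pvPred j k then [(k : Int)] else []) := by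
  rcases h : pvPred j k with _ | _ <;>
    simp [Pb, List.range_succ, List.filter_append, List.filter_cons, h]

theorem mem_Pb_lt {x : Int} {k j : Nat} (h : x ∈ Pb k j) : x < (k : Int) := by
  rw [Pb, List.mem_map] at h
  obtain ⟨p, hp, rfl⟩ := h
  have := List.mem_range.mp (List.mem_filter.mp hp).1
  exact_mod_cast this

theorem Pb_congr (j k k' : Nat) (h : k ≤ k') (hno : ∀ p, k ≤ p → p < k' → pvPred j p = false) :
    Pb k' j = Pb k j := by
  have hr := List.range'_append (s := 0) (m := k) (n := k' - k) (step := 1)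
  simp only [Nat.one_mul, Nat.zero_add] at hr
  have h2 : k + (k' - k) = k' := by omega
  rw [h2] at hr
  have hsplit : List.range k' = List.range k ++ List.range' k (k' - k) := by
    rw [List.range_eq_range', List.range_eq_range', hr]
  have hnil : (List.range' k (k' - k)).filter (pvPred j) = [] := by
    rw [List.filter_eq_nil_iff]
    intro p hp
    rw [List.mem_range'_1] at hp
    simp [hno p hp.1 (by omega)]
  rw [Pb, Pb, hsplit, List.filter_append, hnil, List.append_nil]

theorem set_add_not_mem {s : List Int} {x : Int} (h : x ∉ s) : PySem.Set.add s x = s ++ [x] := by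
  simp [PySem.Set.add, PySem.Set.contains, h]

theorem dvd_toNat_iff {a b : Int} (ha : 0 ≤ a) (hb : 0 ≤ b) : a.toNat ∣ b.toNat ↔ a ∣ b := by
  rw [← Int.natCast_dvd_natCast, Int.toNat_of_nonneg ha, Int.toNat_of_nonneg hb]

theorem pvStrip_spec (d : Int) (hd : 2 ≤ d) (hp : Nat.Prime d.toNat) :
    ∀ m : Int, 1 ≤ m →
      1 ≤ pvStrip m d ∧ ¬ (d ∣ pvStrip m d) ∧
        ∀ q : Nat, Nat.Prime q → (q : Int) ≠ d → (q ∣ (pvStrip m d).toNat ↔ q ∣ m.toNat) := by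
  intro m
  induction m using pvStrip.induct (d := d) with
  | case1 m h ih =>
    intro hm
    have hdvd : d ∣ m := (PySem.Int.mod_eq_zero_iff_dvd m d).mp h.2.2
    have hfd : PySem.Int.floordiv m d = m / d := PySem.Int.floordiv_eq_ediv_of_pos (by omega)
    have hdm : d ≤ m := Int.le_of_dvd (by omega) hdvd
    have h1 : (1:Int) ≤ m / d := by
      rw [Int.le_ediv_iff_mul_le (by omega)]; omega
    have h1' : 1 ≤ PySem.Int.floordiv m d := by rw [hfd]; exact h1
    obtain ⟨ha, hb, hc⟩ := ih h1'
    rw [pvStrip, dif_pos h]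
    refine ⟨ha, hb, ?_⟩
    intro q hq hqd
    rw [hc q hq hqd, hfd]
    have hmd : (m / d) * d = m := Int.ediv_mul_cancel hdvd
    have hA : ((m / d).toNat : Int) = m / d := Int.toNat_of_nonneg (by omega)
    have hD : (d.toNat : Int) = d := Int.toNat_of_nonneg (by omega)
    have hMn : m.toNat = (m / d).toNat * d.toNat := by
      have hcast : (((m / d).toNat * d.toNat : Nat) : Int) = m := by
        push_cast [hA, hD]
        exact hmd
      omega
    rw [hMn]
    constructor
    · intro hq1; exact hq1.mul_right _
    · intro hq1
      rcases (Nat.Prime.dvd_mul hq).mp hq1 with h' | h'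
      · exact h'
      · exact absurd (by rw [(Nat.prime_dvd_prime_iff_eq hq hp).mp h', hD]) hqd
  | case2 m h =>
    intro hm
    rw [pvStrip, dif_neg h]
    have hmod : PySem.Int.mod m d ≠ 0 := fun hc => h ⟨hd, hm, hc⟩
    exact ⟨hm, fun hc => hmod ((PySem.Int.mod_eq_zero_iff_dvd m d).mpr hc),
      fun q _ _ => Iff.rfl⟩

theorem pred_false_of_gt {n p : Nat} (h : n < p) : pvPred n p = false := by
  simp only [pvPred, decide_eq_false_iff_not]
  rintro ⟨-, -, hle⟩
  omega

theorem nodup_pyRange_pos {a b s : Int} (hs : 0 < s) : (PySem.List.pyRange a b s).Nodup := by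
  rw [PySem.List.pyRange_of_pos _ _ hs]
  apply List.Nodup.map _ List.nodup_range
  intro k1 k2 hk
  simp only at hk
  have : (k1 : Int) = (k2 : Int) := by
    have := mul_left_cancel₀ (a := s) (by omega) (by omega : s * (k1:Int) = s * k2)
    exact this
  exact_mod_cast this

theorem Pb_minFac_nil (n : Nat) (h2 : 2 ≤ n) : Pb n.minFac n = [] := by
  rw [Pb, List.map_eq_nil_iff, List.filter_eq_nil_iff]
  intro p hp
  rw [List.mem_range] at hp
  simp only [pvPred, decide_eq_true_eq]
  rintro ⟨hpp, hpd, -⟩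
  exact absurd (Nat.minFac_le_of_dvd hpp.two_le hpd) (by omega)

theorem pvSpfMark_getElem? (s : List Int) (j d : Int) (hj : 0 ≤ j) (t : Nat) :
    (pvSpfMark s j d)[t]? =
      if (t : Int) = j then (s[t]?).map (fun x => if x = 0 then d else x) else s[t]? := by
  have hj' : j = ((j.toNat : Nat) : Int) := (Int.toNat_of_nonneg hj).symm
  rw [pvSpfMark, hj', PySem.List.pyGet?_natCast]
  simp only [Int.toNat_natCast]
  by_cases he : j.toNat = t
  · subst he
    rw [if_pos rfl]
    rcases hlen : s[j.toNat]? with _ | v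
    · have hge : s.length ≤ j.toNat := List.getElem?_eq_none_iff.mp hlen
      simp only [Option.getD_none, Option.map_none]
      rw [if_pos trivial, List.getElem?_set, if_pos rfl, if_neg (by omega)]
    · have hlt : j.toNat < s.length := by
        by_contra hcn
        rw [List.getElem?_eq_none_iff.mpr (by omega)] at hlen
        cases hlen
      simp only [Option.getD_some, Option.map_some]
      by_cases hv : v = 0
      · rw [if_pos hv, List.getElem?_set, if_pos rfl, if_pos hlt, hv]
        simp
      · rw [if_neg hv, hlen, if_neg hv]
  · have he' : (t : Int) ≠ ((j.toNat : Nat) : Int) := by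
      intro hc
      exact he (Nat.cast_injective hc).symm
    rw [if_neg he']
    by_cases hc : (s[j.toNat]?).getD 0 = 0
    · rw [if_pos hc, List.getElem?_set, if_neg he]
    · rw [if_neg hc]

theorem foldl_spfmark_getElem? (d : Int) (L : List Int) (hL : L.Nodup) (hpos : ∀ j ∈ L, 0 ≤ j) :
    ∀ (s : List Int) (t : Nat),
      (L.foldl (fun s j => pvSpfMark s j d) s)[t]? =
        if ((t : Int) ∈ L) then (s[t]?).map (fun x => if x = 0 then d else x) else s[t]? := by
  induction L with
  | nil => intro s t; simp
  | cons j L ih =>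
    intro s t
    simp only [List.nodup_cons] at hL
    rw [List.foldl_cons, ih hL.2 (fun x hx => hpos x (List.mem_cons_of_mem _ hx)),
      pvSpfMark_getElem? s j d (hpos j List.mem_cons_self) t]
    by_cases hmem : (t : Int) ∈ L
    · have hne : (t : Int) ≠ j := by rintro rfl; exact hL.1 hmem
      rw [if_pos hmem, if_neg hne, if_pos (List.mem_cons_of_mem _ hmem)]
    · rw [if_neg hmem]
      by_cases hje : (t : Int) = j
      · rw [if_pos hje, if_pos (hje ▸ List.mem_cons_self)]
      · rw [if_neg hje, if_neg (by simp [hje, hmem])]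

theorem foldl_spfmark_length (d : Int) (L : List Int) :
    ∀ s : List Int, (L.foldl (fun s j => pvSpfMark s j d) s).length = s.length := by
  intro s
  induction L generalizing s with
  | nil => rfl
  | cons j L ih =>
    rw [List.foldl_cons, ih]
    rw [pvSpfMark]
    split <;> simp

-- the value spf[t] holds after the outer loop has processed all d < k
def spfVal (k t : Nat) : Int := if 2 ≤ t ∧ t.minFac < k then ((t.minFac : Nat) : Int) else 0

theorem spfVal_high {a b t : Nat} (ht : t < a) (hab : a ≤ b) : spfVal b t = spfVal a t := by
  rcases lt_or_ge t 2 with h2 | h2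
  · rw [spfVal, spfVal, if_neg (by omega), if_neg (by omega)]
  · have hm := Nat.minFac_le (by omega : 0 < t)
    rw [spfVal, spfVal, if_pos ⟨h2, by omega⟩, if_pos ⟨h2, by omega⟩]

theorem spfVal_succ_ne {k t : Nat} (hne : 2 ≤ t → t.minFac ≠ k) :
    spfVal (k + 1) t = spfVal k t := by
  rcases lt_or_ge t 2 with h2 | h2
  · rw [spfVal, spfVal, if_neg (by omega), if_neg (by omega)]
  · have hm := Nat.minFac_le (by omega : 0 < t)
    have hne' := hne h2
    rw [spfVal, spfVal]
    split_ifs with h1 h2' <;> first | rfl | (exfalso; omega)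

theorem spf_outer (N : Int) : ∀ (c : Nat) (k : Int), 2 ≤ k → (N - k).toNat = c →
    ∀ s : List Int, s.length = N.toNat →
    (∀ t, t < N.toNat → s[t]? = some (spfVal k.toNat t)) →
    (((PySem.List.pyRange k N 1).foldl (pvSpfOuter N) s).length = N.toNat ∧
      ∀ t, t < N.toNat → ((PySem.List.pyRange k N 1).foldl (pvSpfOuter N) s)[t]? = some (spfVal N.toNat t)) := by
  intro c
  induction c with
  | zero =>
    intro k hk hc s hlen hs
    have hNk : N ≤ k := by omega
    rw [PySem.List.pyRange_one_eq_nil hNk]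
    simp only [List.foldl_nil]
    refine ⟨hlen, fun t ht => ?_⟩
    rw [hs t ht, spfVal_high ht (by omega)]
  | succ c ih =>
    intro k hk hc s hlen hs
    rcases lt_or_ge k N with hkN | hkN
    swap
    · rw [PySem.List.pyRange_one_eq_nil (by omega)]
      simp only [List.foldl_nil]
      refine ⟨hlen, fun t ht => ?_⟩
      rw [hs t ht, spfVal_high ht (by omega)]
    rw [PySem.List.pyRange_one_cons hkN, List.foldl_cons]
    have hkK : ((k.toNat : Nat) : Int) = k := Int.toNat_of_nonneg (by omega)
    have hKN : k.toNat < N.toNat := by omega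
    have hK2 : 2 ≤ k.toNat := by omega
    have hsval : (PySem.List.pyGet? s k).getD 0 = spfVal k.toNat k.toNat := by
      rw [← hkK, PySem.List.pyGet?_natCast, hs k.toNat hKN]
      rfl
    suffices hstep : (pvSpfOuter N s k).length = N.toNat ∧
        ∀ t, t < N.toNat → (pvSpfOuter N s k)[t]? = some (spfVal (k + 1).toNat t) by
      exact ih (k + 1) (by omega) (by omega) _ hstep.1 hstep.2
    have ht1 : (k + 1).toNat = k.toNat + 1 := by omega
    rw [ht1]
    by_cases hprime : Nat.Prime k.toNat
    · have hmfK : k.toNat.minFac = k.toNat := (Nat.prime_def_minFac.mp hprime).2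
      have hzero : spfVal k.toNat k.toNat = 0 := by
        rw [spfVal, if_neg (by omega)]
      rw [pvSpfOuter, hsval, hzero, if_pos rfl]
      have hnd := nodup_pyRange_pos (a := k) (b := N) (s := k) (by omega)
      have hposL : ∀ j ∈ PySem.List.pyRange k N k, 0 ≤ j := by
        intro j hj
        have := (PySem.List.mem_pyRange_iff_of_pos (by omega) j).mp hj
        omega
      refine ⟨by rw [foldl_spfmark_length]; exact hlen, fun t ht => ?_⟩
      rw [foldl_spfmark_getElem? k _ hnd hposL s t]
      have hmem_iff : ((t : Int) ∈ PySem.List.pyRange k N k) ↔ (k.toNat ∣ t ∧ k.toNat ≤ t) := by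
        rw [PySem.List.mem_pyRange_iff_of_pos (by omega)]
        constructor
        · rintro ⟨h1, h2, h3⟩
          have hdvd : k ∣ (t : Int) := by
            have h4 := dvd_add h3 (dvd_refl k)
            simpa using h4
          rw [← hkK] at hdvd
          exact ⟨by exact_mod_cast hdvd, by omega⟩
        · rintro ⟨h1, h2⟩
          have hdvd : k ∣ (t : Int) := by
            rw [← hkK]
            exact_mod_cast h1
          exact ⟨by omega, by omega, dvd_sub hdvd (dvd_refl k)⟩
      by_cases hmem : (t : Int) ∈ PySem.List.pyRange k N k
      · rw [if_pos hmem, hs t ht]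
        obtain ⟨hdvd, hle⟩ := hmem_iff.mp hmem
        have h2t : 2 ≤ t := by omega
        have hmfle : t.minFac ≤ k.toNat :=
          Nat.minFac_le_of_dvd hprime.two_le hdvd
        simp only [Option.map_some]
        congr 1
        by_cases hold : t.minFac < k.toNat
        · have h2mf : 2 ≤ t.minFac := (Nat.minFac_prime (by omega : t ≠ 1)).two_le
          have hv1 : spfVal k.toNat t = ((t.minFac : Nat) : Int) := by
            rw [spfVal, if_pos ⟨h2t, hold⟩]
          have hv2 : spfVal (k.toNat + 1) t = ((t.minFac : Nat) : Int) := by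
            rw [spfVal, if_pos ⟨h2t, by omega⟩]
          rw [hv1, hv2, if_neg (by exact_mod_cast (by omega : t.minFac ≠ 0))]
        · have hmfeq : t.minFac = k.toNat := by omega
          have hv1 : spfVal k.toNat t = 0 := by
            rw [spfVal, if_neg (by omega)]
          have hv2 : spfVal (k.toNat + 1) t = ((t.minFac : Nat) : Int) := by
            rw [spfVal, if_pos ⟨h2t, by omega⟩]
          rw [hv1, hv2, if_pos rfl, hmfeq, hkK]
      · rw [if_neg hmem, hs t ht]
        congr 1
        refine (spfVal_succ_ne fun h2t hc => ?_).symm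
        exact hmem (hmem_iff.mpr ⟨hc ▸ Nat.minFac_dvd t,
          hc ▸ Nat.minFac_le (by omega : 0 < t)⟩)
    · have hmfne : k.toNat.minFac ≠ k.toNat := by
        intro hc
        exact hprime (Nat.prime_def_minFac.mpr ⟨hK2, hc⟩)
      have hmflt : k.toNat.minFac < k.toNat := by
        have := Nat.minFac_le (by omega : 0 < k.toNat)
        omega
      have h2mf : 2 ≤ k.toNat.minFac := (Nat.minFac_prime (by omega : k.toNat ≠ 1)).two_le
      have hnz : spfVal k.toNat k.toNat ≠ 0 := by
        rw [spfVal, if_pos ⟨hK2, hmflt⟩]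
        exact_mod_cast (by omega : ¬ (k.toNat.minFac : Int) = 0)
      rw [pvSpfOuter, hsval, if_neg hnz]
      refine ⟨hlen, fun t ht => ?_⟩
      rw [hs t ht]
      congr 1
      refine (spfVal_succ_ne fun h2t hc => ?_).symm
      exact hprime (hc ▸ Nat.minFac_prime (by omega : t ≠ 1))

theorem pvChain_spec (spf : List Int) (n : Nat) (hn : 1 ≤ n)
    (hspf : ∀ t : Nat, 2 ≤ t → t ≤ n → spf[t]? = some ((t.minFac : Nat) : Int)) :
    ∀ (m : Int) (acc : List Int), 1 ≤ m → m ≤ (n : Int) →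
    (∀ q : Nat, Nat.Prime q →
      (q ∣ m.toNat ↔ (q ∣ n ∧ (if m = 1 then n + 1 else m.toNat.minFac) ≤ q))) →
    acc = Pb (if m = 1 then n + 1 else m.toNat.minFac) n →
    pvChain spf m acc = Pb (n + 1) n := by
  intro m acc
  induction m, acc using pvChain.induct (spf := spf) with
  | case1 m acc h ih =>
    intro h1m hmn hinv hacc
    have hm1 := h.1
    have hm2 : 2 ≤ m.toNat := by omega
    have hmlen : m.toNat ≤ n := by omega
    have hcast : ((m.toNat : Nat) : Int) = m := Int.toNat_of_nonneg (by omega)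
    have hg : PySem.List.pyGet? spf m = spf[m.toNat]? := by
      conv_lhs => rw [← hcast]
      rw [PySem.List.pyGet?_natCast]
    have hp : (PySem.List.pyGet? spf m).getD 0 = ((m.toNat.minFac : Nat) : Int) := by
      rw [hg, hspf m.toNat hm2 hmlen]
      rfl
    have hmne1 : ¬ (m = 1) := by omega
    rw [if_neg hmne1] at hinv hacc
    have hPp : Nat.Prime m.toNat.minFac := Nat.minFac_prime (by omega : m.toNat ≠ 1)
    have hP2 : 2 ≤ m.toNat.minFac := hPp.two_le
    have hPd : m.toNat.minFac ∣ m.toNat := Nat.minFac_dvd _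
    obtain ⟨hPn, -⟩ := (hinv _ hPp).mp hPd
    have hPlen : m.toNat.minFac ≤ n := Nat.le_of_dvd (by omega) hPn
    have hpred : pvPred n m.toNat.minFac = true := by
      simp only [pvPred, decide_eq_true_eq]
      exact ⟨hPp, hPn, hPlen⟩
    have hnm : ((m.toNat.minFac : Nat) : Int) ∉ acc := by
      rw [hacc]
      intro hc
      have := mem_Pb_lt hc
      omega
    have haccadd : PySem.Set.add acc ((m.toNat.minFac : Nat) : Int)
        = Pb (m.toNat.minFac + 1) n := by
      rw [set_add_not_mem hnm, hacc, Pb_succ, if_pos hpred]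
    obtain ⟨hs1, hs2, hs3⟩ :=
      pvStrip_spec ((m.toNat.minFac : Nat) : Int) (by exact_mod_cast hP2)
        (by rw [Int.toNat_natCast]; exact hPp) m (by omega)
    have hsle := pvStrip_le m ((m.toNat.minFac : Nat) : Int)
    have hs3' : ∀ q : Nat, Nat.Prime q → q ≠ m.toNat.minFac →
        (q ∣ (pvStrip m ((m.toNat.minFac : Nat) : Int)).toNat ↔ q ∣ m.toNat) := by
      intro q hq hne
      exact hs3 q hq (by exact_mod_cast hne)
    have hsndvd : ¬ (m.toNat.minFac ∣ (pvStrip m ((m.toNat.minFac : Nat) : Int)).toNat) := by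
      intro hc
      apply hs2
      have h0 : (0 : Int) ≤ pvStrip m ((m.toNat.minFac : Nat) : Int) := by omega
      have h0' : (0 : Int) ≤ ((m.toNat.minFac : Nat) : Int) := by positivity
      exact (dvd_toNat_iff h0' h0).mp (by rwa [Int.toNat_natCast])
    have hPlt : m.toNat.minFac + 1 ≤
        (if pvStrip m ((m.toNat.minFac : Nat) : Int) = 1 then n + 1
         else (pvStrip m ((m.toNat.minFac : Nat) : Int)).toNat.minFac) := by
      split_ifs with hst1
      · omega
      · have hst2 : 2 ≤ (pvStrip m ((m.toNat.minFac : Nat) : Int)).toNat := by omega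
        have hq0p : Nat.Prime (pvStrip m ((m.toNat.minFac : Nat) : Int)).toNat.minFac :=
          Nat.minFac_prime (by omega)
        have hq0d := Nat.minFac_dvd (pvStrip m ((m.toNat.minFac : Nat) : Int)).toNat
        have hq0ne : (pvStrip m ((m.toNat.minFac : Nat) : Int)).toNat.minFac ≠ m.toNat.minFac := by
          intro hc
          rw [hc] at hq0d
          exact hsndvd hq0d
        have hq0m : (pvStrip m ((m.toNat.minFac : Nat) : Int)).toNat.minFac ∣ m.toNat :=
          (hs3' ((pvStrip m ((m.toNat.minFac : Nat) : Int)).toNat.minFac) hq0p hq0ne).mp hq0d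
        obtain ⟨-, hq0ge⟩ := (hinv _ hq0p).mp hq0m
        omega
    have hgap : ∀ p', m.toNat.minFac + 1 ≤ p' →
        p' < (if pvStrip m ((m.toNat.minFac : Nat) : Int) = 1 then n + 1
          else (pvStrip m ((m.toNat.minFac : Nat) : Int)).toNat.minFac) →
        pvPred n p' = false := by
      intro p' hp1 hp2
      rcases hpp : pvPred n p' with _ | _
      · rfl
      exfalso
      simp only [pvPred, decide_eq_true_eq] at hpp
      obtain ⟨hprime', hdvd', -⟩ := hpp
      have hpm : p' ∣ m.toNat := (hinv _ hprime').mpr ⟨hdvd', by omega⟩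
      have hpne : p' ≠ m.toNat.minFac := by omega
      have hps : p' ∣ (pvStrip m ((m.toNat.minFac : Nat) : Int)).toNat :=
        (hs3' _ hprime' hpne).mpr hpm
      by_cases hst1 : pvStrip m ((m.toNat.minFac : Nat) : Int) = 1
      · rw [hst1] at hps
        simp at hps
        exact hprime'.one_lt.ne' hps
      · rw [if_neg hst1] at hp2
        exact absurd (Nat.minFac_le_of_dvd hprime'.two_le hps) (by omega)
    have hacc' : PySem.Set.add acc ((m.toNat.minFac : Nat) : Int)
        = Pb (if pvStrip m ((m.toNat.minFac : Nat) : Int) = 1 then n + 1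
            else (pvStrip m ((m.toNat.minFac : Nat) : Int)).toNat.minFac) n := by
      rw [haccadd]
      exact (Pb_congr n (m.toNat.minFac + 1) _ hPlt hgap).symm
    have hinv' : ∀ q : Nat, Nat.Prime q →
        (q ∣ (pvStrip m ((m.toNat.minFac : Nat) : Int)).toNat ↔
          (q ∣ n ∧ (if pvStrip m ((m.toNat.minFac : Nat) : Int) = 1 then n + 1
            else (pvStrip m ((m.toNat.minFac : Nat) : Int)).toNat.minFac) ≤ q)) := by
      intro q hq
      constructor
      · intro hqs
        have hqne : q ≠ m.toNat.minFac := by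
          rintro rfl
          exact hsndvd hqs
        have hqm : q ∣ m.toNat := (hs3' _ hq hqne).mp hqs
        obtain ⟨hqn, hqge⟩ := (hinv _ hq).mp hqm
        refine ⟨hqn, ?_⟩
        split_ifs with hst1
        · exfalso
          rw [hst1] at hqs
          simp at hqs
          exact hq.one_lt.ne' hqs
        · exact Nat.minFac_le_of_dvd hq.two_le hqs
      · rintro ⟨hqn, hqge⟩
        have hqlen : q ≤ n := Nat.le_of_dvd (by omega) hqn
        by_cases hst1 : pvStrip m ((m.toNat.minFac : Nat) : Int) = 1
        · rw [if_pos hst1] at hqge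
          omega
        · rw [if_neg hst1] at hqge
          have hP := hPlt
          rw [if_neg hst1] at hP
          have hqm : q ∣ m.toNat := (hinv _ hq).mpr ⟨hqn, by omega⟩
          exact (hs3' _ hq (by omega)).mpr hqm
    rw [pvChain, dif_pos h, hp]
    rw [hp] at ih
    exact ih (by omega) (by omega) hinv' hacc'
  | case2 m acc h =>
    intro h1m hmn hinv hacc
    rw [pvChain, dif_neg h]
    by_cases hm1 : m = 1
    · rw [if_pos hm1] at hacc
      exact hacc
    · exfalso
      have hm2 : 2 ≤ m.toNat := by omega
      have hmlen : m.toNat ≤ n := by omega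
      have hcast : ((m.toNat : Nat) : Int) = m := Int.toNat_of_nonneg (by omega)
      have hg : PySem.List.pyGet? spf m = spf[m.toNat]? := by
        conv_lhs => rw [← hcast]
        rw [PySem.List.pyGet?_natCast]
      have hp : (PySem.List.pyGet? spf m).getD 0 = ((m.toNat.minFac : Nat) : Int) := by
        rw [hg, hspf m.toNat hm2 hmlen]
        rfl
      have hP2 : 2 ≤ m.toNat.minFac := (Nat.minFac_prime (by omega : m.toNat ≠ 1)).two_le
      have hPd : m.toNat.minFac ∣ m.toNat := Nat.minFac_dvd _
      have hPdI : ((m.toNat.minFac : Nat) : Int) ∣ m := by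
        have := (dvd_toNat_iff (a := ((m.toNat.minFac : Nat) : Int)) (b := m)
          (by omega) (by omega)).mp
        apply this
        rwa [Int.toNat_natCast]
      apply h
      refine ⟨by omega, by rw [hp]; exact_mod_cast hP2, ?_⟩
      rw [hp]
      exact (PySem.Int.mod_eq_zero_iff_dvd _ _).mpr hPdI

theorem pvChain_entry (spf : List Int) (N : Int)
    (hspf : ∀ t : Nat, 2 ≤ t → t < N.toNat → spf[t]? = some ((t.minFac : Nat) : Int))
    (k : Nat) (hk : k < N.toNat) :
    pvChain spf (k : Int) PySem.Set.empty = Pb (k + 1) k := by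
  rcases Nat.eq_zero_or_pos k with rfl | hk1
  · rw [pvChain, dif_neg (by norm_num)]
    have h0 : pvPred 0 0 = false := by simp [pvPred, Nat.not_prime_zero]
    simp [Pb, List.range_succ, h0, PySem.Set.empty]
  · have hspf' : ∀ t : Nat, 2 ≤ t → t ≤ k → spf[t]? = some ((t.minFac : Nat) : Int) :=
      fun t h2 htk => hspf t h2 (by omega)
    have htn : ((k : Int)).toNat = k := Int.toNat_natCast k
    have hinv : ∀ q : Nat, Nat.Prime q →
        (q ∣ ((k : Int)).toNat ↔ (q ∣ k ∧ (if (k : Int) = 1 then k + 1 else ((k : Int)).toNat.minFac) ≤ q)) := by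
      intro q hq
      rw [htn]
      by_cases hk1' : (k : Int) = 1
      · have hkk : k = 1 := by exact_mod_cast hk1'
        rw [if_pos hk1', hkk]
        constructor
        · intro hd
          exact absurd (Nat.dvd_one.mp hd) hq.one_lt.ne'
        · rintro ⟨hd, -⟩
          exact hd
      · have hk2 : 2 ≤ k := by
          have : k ≠ 1 := fun hc => hk1' (by exact_mod_cast hc)
          omega
        rw [if_neg hk1']
        exact ⟨fun hd => ⟨hd, Nat.minFac_le_of_dvd hq.two_le hd⟩, fun hd => hd.1⟩
    have hacc : (PySem.Set.empty : List Int)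
        = Pb (if (k : Int) = 1 then k + 1 else ((k : Int)).toNat.minFac) k := by
      by_cases hk1' : (k : Int) = 1
      · have hkk : k = 1 := by exact_mod_cast hk1'
        rw [if_pos hk1', hkk]
        exact (Pb_two 1).symm
      · have hk2 : 2 ≤ k := by
          have : k ≠ 1 := fun hc => hk1' (by exact_mod_cast hc)
          omega
        rw [if_neg hk1', htn]
        exact (Pb_minFac_nil k hk2).symm
    exact pvChain_spec spf k hk1 hspf' (k : Int) PySem.Set.empty
      (by exact_mod_cast hk1) (le_refl _) hinv hacc

-- ===== A side =====

theorem pvMark_getElem? (u : List (List Int)) (j p : Int) (hj : 0 ≤ j) (t : Nat) :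
    (pvMark u j p)[t]? =
      if (t : Int) = j then (u[t]?).map (fun s => PySem.Set.add s p) else u[t]? := by
  have hj' : j = ((j.toNat : Nat) : Int) := (Int.toNat_of_nonneg hj).symm
  rw [pvMark, hj', PySem.List.pyGet?_natCast, List.getElem?_set]
  simp only [Int.toNat_natCast]
  by_cases he : j.toNat = t
  · subst he
    rw [if_pos rfl, if_pos rfl]
    rcases Nat.lt_or_ge j.toNat u.length with hlt | hge
    · rw [if_pos hlt, List.getElem?_eq_getElem hlt]
      simp
    · rw [if_neg (by omega), List.getElem?_eq_none_iff.mpr hge]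
      simp
  · rw [if_neg he, if_neg (fun hc => he (Nat.cast_injective hc).symm)]

theorem foldl_mark_getElem? (p : Int) (L : List Int) (hL : L.Nodup) (hpos : ∀ j ∈ L, 0 ≤ j) :
    ∀ (u : List (List Int)) (t : Nat),
      (L.foldl (fun u j => pvMark u j p) u)[t]? =
        if ((t : Int) ∈ L) then (u[t]?).map (fun s => PySem.Set.add s p) else u[t]? := by
  induction L with
  | nil => intro u t; simp
  | cons j L ih =>
    intro u t
    simp only [List.nodup_cons] at hL
    rw [List.foldl_cons, ih hL.2 (fun x hx => hpos x (List.mem_cons_of_mem _ hx)),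
      pvMark_getElem? u j p (hpos j List.mem_cons_self) t]
    by_cases hmem : (t : Int) ∈ L
    · have hne : (t : Int) ≠ j := by rintro rfl; exact hL.1 hmem
      rw [if_pos hmem, if_neg hne, if_pos (List.mem_cons_of_mem _ hmem)]
    · rw [if_neg hmem]
      by_cases hje : (t : Int) = j
      · rw [if_pos hje, if_pos (hje ▸ List.mem_cons_self)]
      · rw [if_neg hje, if_neg (by simp [hje, hmem])]

theorem foldl_mark_length (p : Int) (L : List Int) :
    ∀ u : List (List Int), (L.foldl (fun u j => pvMark u j p) u).length = u.length := by
  intro u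
  induction L generalizing u with
  | nil => rfl
  | cons j L ih =>
    rw [List.foldl_cons, ih]
    simp [pvMark]

theorem Pb_self_nil_iff {K : Nat} (hK : 2 ≤ K) : Pb K K = [] ↔ Nat.Prime K := by
  constructor
  · intro hnil
    by_contra hnp
    have hmf := Nat.minFac_prime (n := K) (by omega)
    have hdvd := Nat.minFac_dvd K
    have hle : K.minFac ≤ K := Nat.le_of_dvd (by omega) hdvd
    have hne : K.minFac ≠ K := by
      intro hc
      exact hnp (Nat.prime_def_minFac.mpr ⟨hK, hc⟩)
    have hmem : K.minFac ∈ (List.range K).filter (pvPred K) := by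
      rw [List.mem_filter, List.mem_range]
      refine ⟨by omega, ?_⟩
      simp only [pvPred, decide_eq_true_eq]
      exact ⟨hmf, hdvd, hle⟩
    rw [Pb, List.map_eq_nil_iff] at hnil
    rw [hnil] at hmem
    cases hmem
  · intro hp
    rw [Pb, List.map_eq_nil_iff, List.filter_eq_nil_iff]
    intro p hpmem
    rw [List.mem_range] at hpmem
    simp only [pvPred, decide_eq_true_eq]
    rintro ⟨hpp, hpd, -⟩
    exact absurd ((Nat.prime_dvd_prime_iff_eq hpp hp).mp hpd) (by omega)

theorem outer_fold (N : Int) : ∀ (c : Nat) (k : Int), 2 ≤ k → (N - k).toNat = c →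
    ∀ u : List (List Int), u.length = N.toNat →
    (∀ t, t < N.toNat → u[t]? = some (Pb k.toNat t)) →
    (((PySem.List.pyRange k N 1).foldl (pvOuter N) u).length = N.toNat ∧
      ∀ t, t < N.toNat → ((PySem.List.pyRange k N 1).foldl (pvOuter N) u)[t]? = some (Pb N.toNat t)) := by
  intro c
  induction c with
  | zero =>
    intro k hk hc u hlen hu
    have hNk : N ≤ k := by omega
    rw [PySem.List.pyRange_one_eq_nil hNk]
    simp only [List.foldl_nil]
    refine ⟨hlen, fun t ht => ?_⟩
    rw [hu t ht]
    congr 1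
    exact Pb_congr t N.toNat k.toNat (by omega) (fun p hp1 hp2 => pred_false_of_gt (by omega))
  | succ c ih =>
    intro k hk hc u hlen hu
    rcases lt_or_ge k N with hkN | hkN
    swap
    · rw [PySem.List.pyRange_one_eq_nil (by omega)]
      simp only [List.foldl_nil]
      refine ⟨hlen, fun t ht => ?_⟩
      rw [hu t ht]
      congr 1
      exact Pb_congr t N.toNat k.toNat (by omega) (fun p hp1 hp2 => pred_false_of_gt (by omega))
    rw [PySem.List.pyRange_one_cons hkN, List.foldl_cons]
    have hkK : ((k.toNat : Nat) : Int) = k := Int.toNat_of_nonneg (by omega)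
    have hKN : k.toNat < N.toNat := by omega
    have hsval : (PySem.List.pyGet? u k).getD [] = Pb k.toNat k.toNat := by
      rw [← hkK, PySem.List.pyGet?_natCast, hu k.toNat hKN]
      rfl
    have ht1 : (k + 1).toNat = k.toNat + 1 := by omega
    suffices hstep : (pvOuter N u k).length = N.toNat ∧
        ∀ t, t < N.toNat → (pvOuter N u k)[t]? = some (Pb (k + 1).toNat t) by
      exact ih (k + 1) (by omega) (by omega) _ hstep.1 hstep.2
    by_cases hprime : Nat.Prime k.toNat
    · have hnil : Pb k.toNat k.toNat = [] := (Pb_self_nil_iff (by omega)).mpr hprime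
      rw [pvOuter, hsval, hnil, if_neg (by simp)]
      have hnd := nodup_pyRange_pos (a := k) (b := N) (s := k) (by omega)
      have hposL : ∀ j ∈ PySem.List.pyRange k N k, 0 ≤ j := by
        intro j hj
        have := (PySem.List.mem_pyRange_iff_of_pos (by omega) j).mp hj
        omega
      refine ⟨by rw [foldl_mark_length]; exact hlen, fun t ht => ?_⟩
      rw [foldl_mark_getElem? k _ hnd hposL u t]
      have hmem_iff : ((t : Int) ∈ PySem.List.pyRange k N k) ↔ (k.toNat ∣ t ∧ k.toNat ≤ t) := by
        rw [PySem.List.mem_pyRange_iff_of_pos (by omega)]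
        constructor
        · rintro ⟨h1, h2, h3⟩
          have hdvd : k ∣ (t : Int) := by
            have h4 := dvd_add h3 (dvd_refl k)
            simpa using h4
          rw [← hkK] at hdvd
          exact ⟨by exact_mod_cast hdvd, by omega⟩
        · rintro ⟨h1, h2⟩
          have hdvd : k ∣ (t : Int) := by
            rw [← hkK]
            exact_mod_cast h1
          exact ⟨by omega, by omega, dvd_sub hdvd (dvd_refl k)⟩
      by_cases hmem : (t : Int) ∈ PySem.List.pyRange k N k
      · rw [if_pos hmem, hu t ht]
        obtain ⟨hdvd, hle⟩ := hmem_iff.mp hmem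
        simp only [Option.map_some]
        congr 1
        have hpred : pvPred t k.toNat = true := by
          simp only [pvPred, decide_eq_true_eq]
          exact ⟨hprime, hdvd, hle⟩
        have hnm : k ∉ Pb k.toNat t := by
          intro hc
          have := mem_Pb_lt hc
          omega
        rw [set_add_not_mem hnm, ht1, Pb_succ, if_pos hpred, hkK]
      · rw [if_neg hmem, hu t ht]
        congr 1
        have hpred : pvPred t k.toNat = false := by
          simp only [pvPred, decide_eq_false_iff_not]
          rintro ⟨-, hdvd, hle⟩
          exact hmem (hmem_iff.mpr ⟨hdvd, hle⟩)
        rw [ht1, Pb_succ, hpred]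
        simp
    · have hne : Pb k.toNat k.toNat ≠ [] := fun hc => hprime ((Pb_self_nil_iff (by omega)).mp hc)
      rw [pvOuter, hsval, if_pos hne]
      refine ⟨hlen, fun t ht => ?_⟩
      rw [hu t ht]
      congr 1
      have hpred : pvPred t k.toNat = false := by
        simp only [pvPred, decide_eq_false_iff_not]
        rintro ⟨hp, -, -⟩
        exact hprime hp
      rw [ht1, Pb_succ, hpred]
      simp

-- ===== assembly =====

theorem a_char (N : Int) :
    mk_uint2primes__p_divs__lt N = (List.range N.toNat).map (fun t => Pb (t + 1) t) := by
  simp only [mk_uint2primes__p_divs__lt]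
  rcases lt_or_ge N 2 with hN | hN
  · rw [PySem.List.pyRange_one_eq_nil (by omega : N ≤ 2)]
    simp only [List.foldl_nil]
    rcases lt_or_ge N 1 with hN0 | hN0
    · rw [PySem.List.pyRange_one_eq_nil (by omega : N ≤ 0)]
      have hz : N.toNat = 0 := by omega
      rw [hz]
      simp
    · have hN1 : N = 1 := by omega
      subst hN1
      rw [PySem.List.pyRange_one_cons (by norm_num), PySem.List.pyRange_one_eq_nil (by norm_num)]
      have h1 : (1 : Int).toNat = 1 := rfl
      rw [h1]
      simp [List.range_succ, Pb, pvPred, Nat.not_prime_zero, PySem.Set.empty]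
  · have hlen0 : ((PySem.List.pyRange 0 N 1).map
        (fun _ => (PySem.Set.empty : List Int))).length = N.toNat := by
      rw [List.length_map, PySem.List.length_pyRange_one]
      omega
    have hinit : ∀ t, t < N.toNat → ((PySem.List.pyRange 0 N 1).map
        (fun _ => (PySem.Set.empty : List Int)))[t]? = some (Pb (2 : Int).toNat t) := by
      intro t ht
      have htl : t < (PySem.List.pyRange 0 N 1).length := by
        rw [PySem.List.length_pyRange_one]
        omega
      rw [List.getElem?_map, List.getElem?_eq_getElem htl]
      simp only [Option.map_some]
      exact congrArg some (Pb_two t).symm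
    obtain ⟨hlenf, hentf⟩ := outer_fold N (N - 2).toNat 2 (le_refl 2) rfl _ hlen0 hinit
    apply List.ext_getElem?
    intro i
    rcases lt_or_ge i N.toNat with hi | hi
    · have hir : i < (List.range N.toNat).length := by simpa using hi
      rw [hentf i hi, List.getElem?_map, List.getElem?_eq_getElem hir]
      simp only [Option.map_some, List.getElem_range]
      congr 1
      exact Pb_congr i (i + 1) N.toNat (by omega) (fun p hp1 hp2 => pred_false_of_gt (by omega))
    · have h1 : (((PySem.List.pyRange 2 N 1).foldl (pvOuter N)
          ((PySem.List.pyRange 0 N 1).map (fun _ => (PySem.Set.empty : List Int)))))[i]? = none :=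
        List.getElem?_eq_none_iff.mpr (by rw [hlenf]; omega)
      have h2 : ((List.range N.toNat).map (fun t => Pb (t + 1) t))[i]? = none :=
        List.getElem?_eq_none_iff.mpr (by simpa using hi)
      rw [h1, h2]


theorem b_char (N : Int) :
    mk_uint2primes__p_divs__lt_alt N = (List.range N.toNat).map (fun t => Pb (t + 1) t) := by
  simp only [mk_uint2primes__p_divs__lt_alt]
  have hspf : ∀ t : Nat, 2 ≤ t → t < N.toNat →
      ((PySem.List.pyRange 2 N 1).foldl (pvSpfOuter N)
        (List.replicate N.toNat (0 : Int)))[t]? = some ((t.minFac : Nat) : Int) := by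
    intro t h2 ht
    have hN : 2 ≤ N := by omega
    have hinit : ∀ t', t' < N.toNat →
        (List.replicate N.toNat (0 : Int))[t']? = some (spfVal (2 : Int).toNat t') := by
      intro t' ht'
      rw [List.getElem?_replicate, if_pos ht']
      congr 1
      show (0 : Int) = spfVal 2 t'
      rcases lt_or_ge t' 2 with h2' | h2'
      · rw [spfVal, if_neg (by omega)]
      · have := (Nat.minFac_prime (by omega : t' ≠ 1)).two_le
        rw [spfVal, if_neg (by omega)]
    obtain ⟨-, hent⟩ := spf_outer N (N - 2).toNat 2 (le_refl 2) rfl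
      (List.replicate N.toNat (0 : Int)) (by simp) hinit
    rw [hent t ht]
    congr 1
    have hmfle : t.minFac ≤ t := Nat.minFac_le (by omega)
    rw [spfVal, if_pos ⟨h2, by omega⟩]
  rw [PySem.List.pyRange_one 0 N, sub_zero, List.map_map]
  apply List.map_congr_left
  intro k hk
  simp only [Function.comp_apply, zero_add]
  exact pvChain_entry _ N hspf k (List.mem_range.mp hk)

-- ===== VERDICT (by name: the statement is the Claim_ definition above) =====
theorem mk_uint2primes__p_divs__lt_spec : Claim_equal_mk_uint2primes__p_divs__lt := by
  intro N _
  unfold Spec_mk_uint2primes__p_divs__lt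
  rw [a_char, b_char]
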